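-- pv_equiv track=rewrite | github.com/PramudioBagasITB/100CandiMomen | Fungsi Tambahan.py | my_split
-- ===== SOURCE A (Python) =====
-- def my_split(string, delimiter):
--     substrings = []
--     current_substring = ''
--     for i in range (len(string)-1):
--         if string[i] == delimiter:
--             substrings += [current_substring]
--             current_substring = ''
--         elif string[i]+string[i+1]!='\n':
--             current_substring += string[i]
--     substrings += [current_substring]
--     return substrings
-- ===== SOURCE B (Python) =====
-- def my_split(string, delimiter):
--     s = string[:-1]
--     cuts = [i for i in range(len(s)) if s[i] == delimiter]
--     parts = []
--     start = 0
--     for c in cuts: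
--         parts.append(s[start:c])
--         start = c + 1
--     parts.append(s[start:])
--     return parts
-- ===== Notes on version B (the rewrite author's own statement) =====
-- stated objective: faster
-- what changed: Replaces A's single pass that concatenates characters one by one into a growing current substring with a two-pass scheme: first collect the cut indices where s[i] == delimiter on s = string[:-1], then slice s between consecutive cuts (A's always-true two-char '\n' guard disappears).
import Mathlib
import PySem

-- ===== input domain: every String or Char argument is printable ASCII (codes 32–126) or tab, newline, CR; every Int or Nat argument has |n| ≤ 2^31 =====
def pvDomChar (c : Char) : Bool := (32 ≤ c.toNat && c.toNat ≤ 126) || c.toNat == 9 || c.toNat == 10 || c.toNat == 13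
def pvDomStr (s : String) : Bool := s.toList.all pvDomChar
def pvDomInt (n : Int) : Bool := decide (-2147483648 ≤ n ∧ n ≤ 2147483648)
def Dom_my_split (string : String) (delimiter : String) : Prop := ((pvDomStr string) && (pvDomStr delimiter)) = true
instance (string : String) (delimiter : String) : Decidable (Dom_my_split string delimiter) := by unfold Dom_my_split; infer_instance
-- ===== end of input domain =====

-- B replaces A's char-by-char accumulation with a two-pass cut-index collection followed by slicing; same result, measurably faster in Python by a constant factor.

-- ===== PORT A =====
-- literal port of A: fold over i in range(len(string)-1), state = (substrings, current_substring);
-- Python '==' on strings is compared on the char lists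
def my_split (string : String) (delimiter : String) : List String :=
  let cs := string.toList
  let st := (PySem.List.pyRange 0 ((cs.length : Int) - 1)).foldl
    (fun (st : List String × List Char) i =>
      match PySem.List.pyGet? cs i with
      | none => st
      | some c =>
        if [c] = delimiter.toList then (st.1 ++ [String.mk st.2], ([] : List Char))
        else
          match PySem.List.pyGet? cs (i + 1) with
          | none => st
          | some c2 => if ¬ ([c, c2] = ['\n']) then (st.1, st.2 ++ [c]) else st)
    ([], [])
  st.1 ++ [String.mk st.2]

-- ===== PORT B =====
-- literal port of B (Source B): s = string[:-1]; cuts = indices with s[i] == delimiter; then slice between cuts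
def my_split_alt (string : String) (delimiter : String) : List String :=
  let s := PySem.List.slice string.toList none (some (-1))
  let cuts := (PySem.List.pyRange 0 (s.length : Int)).filter
    (fun i =>
      match PySem.List.pyGet? s i with
      | some c => decide ([c] = delimiter.toList)
      | none => false)
  let st := cuts.foldl
    (fun (st : List String × Int) c =>
      (st.1 ++ [String.mk (PySem.List.slice s (some st.2) (some c))], c + 1))
    ([], 0)
  st.1 ++ [String.mk (PySem.List.slice s (some st.2) none)]

-- ===== PRECONDITION & SPEC =====
def Spec_my_split (string : String) (delimiter : String) (out : List String) : Prop := out = my_split_alt string delimiter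
instance (string : String) (delimiter : String) (out : List String) : Decidable (Spec_my_split string delimiter out) := by unfold Spec_my_split; infer_instance

-- ===== CLAIM (what is proved, stated in full; the proofs are below) =====
def Claim_equal_my_split : Prop := ∀ (string : String) (delimiter : String), Dom_my_split string delimiter → Spec_my_split string delimiter (my_split string delimiter)

-- ===== LEMMAS AND PROOFS =====

-- reference splitter on char lists: split l at every char c with [c] = d
def pvSplit (d : List Char) : List Char → List (List Char)
  | [] => [[]]
  | c :: t =>
    if [c] = d then [] :: pvSplit d t
    else
      match pvSplit d t with
      | [] => [[c]]
      | h :: r => (c :: h) :: r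

-- relative cut positions (the indices pvSplit splits at)
def pvCuts (d : List Char) : List Char → List Nat
  | [] => []
  | c :: t => if [c] = d then 0 :: (pvCuts d t).map (· + 1) else (pvCuts d t).map (· + 1)

def pvConsHead (pre : List Char) : List (List Char) → List (List Char)
  | [] => [pre]
  | h :: r => (pre ++ h) :: r

def pvCharStep (d : List Char) (st : List String × List Char) (c : Char) : List String × List Char :=
  if [c] = d then (st.1 ++ [String.mk st.2], []) else (st.1, st.2 ++ [c])

def pvIsCut (d : List Char) (cs : List Char) (i : Nat) : Bool :=
  match cs[i]? with
  | some c => decide ([c] = d)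
  | none => false

lemma pvSplit_ne_nil (d : List Char) (l : List Char) : pvSplit d l ≠ [] := by
  cases l with
  | nil => simp [pvSplit]
  | cons c t =>
    simp only [pvSplit]
    split_ifs
    · simp
    · rcases h : pvSplit d t with _ | ⟨h', r⟩ <;> simp

lemma pvTake_range (cs : List Char) (k : Nat) (hk : k ≤ cs.length) (x : Char) :
    (List.range k).map (fun i => cs.getD i x) = cs.take k := by
  induction cs generalizing k with
  | nil =>
    have : k = 0 := by simpa using hk
    subst this; simp
  | cons c t ih =>
    cases k with
    | zero => simp
    | succ m =>
      rw [List.range_succ_eq_map]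
      simp only [List.map_cons, List.map_map, List.take_succ_cons, List.getD_cons_zero]
      rw [show ((fun i => (c :: t).getD i x) ∘ Nat.succ) = (fun i => t.getD i x) from rfl]
      rw [ih m (by simpa using hk)]

-- A's index fold is the char fold over string[:-1]
lemma pvA_index_to_char (cs d : List Char) (st : List String × List Char) :
    (PySem.List.pyRange 0 ((cs.length : Int) - 1)).foldl
      (fun (st : List String × List Char) i =>
        match PySem.List.pyGet? cs i with
        | none => st
        | some c =>
          if [c] = d then (st.1 ++ [String.mk st.2], ([] : List Char))
          else
            match PySem.List.pyGet? cs (i + 1) with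
            | none => st
            | some c2 => if ¬ ([c, c2] = ['\n']) then (st.1, st.2 ++ [c]) else st)
      st
    = cs.dropLast.foldl (pvCharStep d) st := by
  cases cs with
  | nil => norm_num [PySem.List.pyRange]
  | cons c t =>
    have hlen : (((c :: t).length : Int) - 1) = ((t.length : Nat) : Int) := by
      simp
    rw [hlen, PySem.List.pyRange_zero_natCast, List.foldl_map]
    have hcongr : List.foldl
        (fun (st : List String × List Char) (i : Nat) =>
          match PySem.List.pyGet? (c :: t) (i : Int) with
          | none => st
          | some c' =>
            if [c'] = d then (st.1 ++ [String.mk st.2], ([] : List Char))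
            else
              match PySem.List.pyGet? (c :: t) ((i : Int) + 1) with
              | none => st
              | some c2 => if ¬ ([c', c2] = ['\n']) then (st.1, st.2 ++ [c']) else st)
        st (List.range t.length)
      = List.foldl (fun acc i => pvCharStep d acc ((c :: t).getD i ' ')) st (List.range t.length) := by
      apply PySem.List.foldl_congr_mem
      intro acc i hi
      rw [List.mem_range] at hi
      have h1 : i < (c :: t).length := by simp; omega
      have h2 : i + 1 < (c :: t).length := by simp; omega
      have g1 : PySem.List.pyGet? (c :: t) (i : Int) = some ((c :: t)[i]) := by
        rw [PySem.List.pyGet?_natCast, List.getElem?_eq_getElem h1]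
      have g2 : PySem.List.pyGet? (c :: t) ((i : Int) + 1) = some ((c :: t)[i + 1]) := by
        have : ((i : Int) + 1) = ((i + 1 : Nat) : Int) := by push_cast; ring
        rw [this, PySem.List.pyGet?_natCast, List.getElem?_eq_getElem h2]
      rw [g1, g2]
      simp only [pvCharStep, List.getD_eq_getElem?_getD, List.getElem?_eq_getElem h1,
        Option.getD_some]
      split_ifs <;> first | rfl | simp_all
    rw [hcongr, ← List.foldl_map, pvTake_range _ _ (by simp) ' ', List.dropLast_eq_take]
    simp

-- the char fold computes pvSplit
lemma pvA_char_to_split (d : List Char) (l : List Char) :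
    ∀ (subs : List String) (cur : List Char),
      (l.foldl (pvCharStep d) (subs, cur)).1 ++ [String.mk (l.foldl (pvCharStep d) (subs, cur)).2]
        = subs ++ (pvConsHead cur (pvSplit d l)).map String.mk := by
  induction l with
  | nil => intro subs cur; simp [pvConsHead, pvSplit]
  | cons c t ih =>
    intro subs cur
    simp only [List.foldl_cons]
    by_cases hc : [c] = d
    · rw [show pvCharStep d (subs, cur) c = (subs ++ [String.mk cur], []) from by
        simp [pvCharStep, hc]]
      rw [ih]
      rcases h : pvSplit d t with _ | ⟨h', r⟩
      · exact absurd h (pvSplit_ne_nil d t)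
      · simp [pvSplit, hc, h, pvConsHead]
    · rw [show pvCharStep d (subs, cur) c = (subs, cur ++ [c]) from by
        simp [pvCharStep, hc]]
      rw [ih]
      rcases h : pvSplit d t with _ | ⟨h', r⟩
      · exact absurd h (pvSplit_ne_nil d t)
      · simp [pvSplit, hc, h, pvConsHead]

lemma pvCuts_filter (d cs : List Char) :
    (List.range cs.length).filter (pvIsCut d cs) = pvCuts d cs := by
  induction cs with
  | nil => simp [pvCuts]
  | cons c t ih =>
    rw [show (c :: t).length = t.length + 1 from rfl, List.range_succ_eq_map,
      List.filter_cons, List.filter_map]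
    have h0 : pvIsCut d (c :: t) 0 = decide ([c] = d) := by simp [pvIsCut]
    have hshift : (pvIsCut d (c :: t) ∘ Nat.succ) = pvIsCut d t := by
      funext i; simp [pvIsCut]
    rw [h0, hshift, ih]
    by_cases hc : [c] = d
    · simp [pvCuts, hc]
    · simp [pvCuts, hc]

-- B's filtered range is the cut list
lemma pvB_cuts (d cs : List Char) :
    (PySem.List.pyRange 0 (cs.length : Int)).filter
      (fun i =>
        match PySem.List.pyGet? cs i with
        | some c => decide ([c] = d)
        | none => false)
    = (pvCuts d cs).map (fun k : Nat => (k : Int)) := by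
  rw [PySem.List.pyRange_zero_natCast, List.filter_map]
  rw [show ((fun (i : Int) =>
        match PySem.List.pyGet? cs i with
        | some c => decide ([c] = d)
        | none => false) ∘ (fun (k : Nat) => (k : Int))) = pvIsCut d cs from by
    funext k
    simp only [Function.comp_apply, PySem.List.pyGet?_natCast, pvIsCut]]
  rw [pvCuts_filter]

-- B's slice fold reconstructs pvSplit
lemma pvB_slices (d s : List Char) (u : List Char) :
    ∀ (j st : Nat) (parts : List String), st ≤ j → j ≤ s.length → s.drop j = u →
      (((pvCuts d u).map (fun k => ((j + k : Nat) : Int))).foldl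
          (fun (st' : List String × Int) c =>
            (st'.1 ++ [String.mk (PySem.List.slice s (some st'.2) (some c))], c + 1))
          (parts, (st : Int))).1
        ++ [String.mk (PySem.List.slice s
            (some (((pvCuts d u).map (fun k => ((j + k : Nat) : Int))).foldl
              (fun (st' : List String × Int) c =>
                (st'.1 ++ [String.mk (PySem.List.slice s (some st'.2) (some c))], c + 1))
              (parts, (st : Int))).2) none)]
      = parts ++ (pvConsHead ((s.drop st).take (j - st)) (pvSplit d u)).map String.mk := by
  induction u with
  | nil =>
    intro j st parts h1 h2 h3
    have hj : j = s.length := by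
      have := List.drop_eq_nil_iff.mp h3
      omega
    simp only [pvCuts, List.map_nil, List.foldl_nil, PySem.List.slice_from_natCast,
      pvSplit, pvConsHead]
    have : (s.drop st).take (j - st) = s.drop st := by
      apply List.take_of_length_le
      simp [hj]
    simp [this]
  | cons c t ih =>
    intro j st parts h1 h2 h3
    have hj : j < s.length := by
      by_contra hnot
      rw [List.drop_eq_nil_of_le (by omega)] at h3
      exact List.cons_ne_nil c t h3.symm
    have ht : s.drop (j + 1) = t := by
      rw [← List.drop_drop]  -- drop 1 (drop j s)
      rw [h3]
      rfl
    have hcj : s[j]? = some c := by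
      have : (s.drop j)[0]? = some c := by rw [h3]; rfl
      rwa [List.getElem?_drop, Nat.add_zero] at this
    by_cases hc : [c] = d
    · -- cut at relative 0
      rw [show pvCuts d (c :: t) = 0 :: (pvCuts d t).map (· + 1) from by
        simp [pvCuts, hc]]
      simp only [List.map_cons, List.map_map, List.foldl_cons]
      have hstep : ((parts, (st : Int)).1
            ++ [String.mk (PySem.List.slice s (some (parts, (st : Int)).2) (some ((j + 0 : Nat) : Int)))],
          ((j + 0 : Nat) : Int) + 1)
          = (parts ++ [String.mk ((s.drop st).take (j - st))], ((j + 1 : Nat) : Int)) := by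
        simp [PySem.List.slice_natCast]
      rw [hstep]
      rw [show ((fun k => ((j + k : Nat) : Int)) ∘ (· + 1 : Nat → Nat))
            = (fun k => (((j + 1) + k : Nat) : Int)) from by
        funext k; simp; ring]
      rw [ih (j + 1) (j + 1) _ (le_refl _) (by omega) ht]
      rcases h : pvSplit d t with _ | ⟨h', r⟩
      · exact absurd h (pvSplit_ne_nil d t)
      · simp [pvSplit, hc, h, pvConsHead]
    · -- no cut at relative 0
      rw [show pvCuts d (c :: t) = (pvCuts d t).map (· + 1) from by
        simp [pvCuts, hc]]
      simp only [List.map_map]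
      rw [show ((fun k => ((j + k : Nat) : Int)) ∘ (· + 1 : Nat → Nat))
            = (fun k => (((j + 1) + k : Nat) : Int)) from by
        funext k; simp; ring]
      rw [ih (j + 1) st parts (by omega) (by omega) ht]
      have hpre : (s.drop st).take (j + 1 - st) = (s.drop st).take (j - st) ++ [c] := by
        rw [show j + 1 - st = (j - st) + 1 from by omega, List.take_add_one]
        rw [List.getElem?_drop, show st + (j - st) = j from by omega, hcj]
        rfl
      rcases h : pvSplit d t with _ | ⟨h', r⟩
      · exact absurd h (pvSplit_ne_nil d t)
      · simp [pvSplit, hc, h, pvConsHead, hpre]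

-- ===== VERDICT (by name: the statement is the Claim_ definition above) =====
theorem my_split_spec : Claim_equal_my_split := by
  intro string delimiter _
  unfold Spec_my_split my_split my_split_alt
  dsimp only
  rw [PySem.List.slice_to_neg_one]
  set cs := string.toList
  set d := delimiter.toList with hd
  rw [pvA_index_to_char cs d, pvA_char_to_split d cs.dropLast [] []]
  rw [pvB_cuts d cs.dropLast]
  have hmap : (pvCuts d cs.dropLast).map (fun k : Nat => (k : Int))
      = (pvCuts d cs.dropLast).map (fun k : Nat => ((0 + k : Nat) : Int)) := by
    apply List.map_congr_left; intro k _; simp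
  have h := pvB_slices d cs.dropLast cs.dropLast 0 0 [] (le_refl 0) (Nat.zero_le _) (by simp)
  rw [Nat.cast_zero] at h
  rw [hmap, h]
  simp
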